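-- pv_equiv track=rewrite | github.com/Iwofkt/tdde23-2025-labbar-05-u1-b-06 | lab2/lab2.py | multi_weight
-- ===== SOURCE A (Python) =====
-- def multi_weight(pnr):
--     multi = 2
--     for i in range(len(pnr)):
--         if multi == 2:
--             pnr[i] *= multi
--             multi = 1
--         else:
--             multi = 2
--     return pnr
-- ===== SOURCE B (Python) =====
-- def multi_weight(pnr):
--     for i in range(0, len(pnr), 2):
--         pnr[i] *= 2
--     return pnr
-- ===== Notes on version B (the rewrite author's own statement) =====
-- stated objective: simpler
-- what changed: B drops the alternating 'multi' toggle and the if/else branch, stepping directly over the even indices with range(0, len, 2) and doubling each, mutating in place and returning the same list.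
import Mathlib
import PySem

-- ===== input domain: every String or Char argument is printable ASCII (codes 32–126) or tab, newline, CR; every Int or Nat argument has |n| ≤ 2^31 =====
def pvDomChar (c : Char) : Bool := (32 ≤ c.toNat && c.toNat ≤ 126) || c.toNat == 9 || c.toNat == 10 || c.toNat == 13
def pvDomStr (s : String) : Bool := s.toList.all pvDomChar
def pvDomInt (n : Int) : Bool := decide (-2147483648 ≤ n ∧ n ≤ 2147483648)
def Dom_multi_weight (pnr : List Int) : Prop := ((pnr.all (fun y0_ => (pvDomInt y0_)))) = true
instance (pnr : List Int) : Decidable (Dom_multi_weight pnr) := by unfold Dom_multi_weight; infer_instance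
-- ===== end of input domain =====

-- B replaces A's alternating 'multi' toggle + if/else by a direct loop over the even
-- indices (range(0, len, 2)); objective: simpler. Both A and B mutate the argument list
-- in place and return the same object; the equivalence proved here is about the return value.

-- ===== PORT A =====
def multi_weight (pnr : List Int) : List Int :=
  ((PySem.List.pyRange 0 pnr.length 1).foldl
    (fun (st : List Int × Int) i =>
      if st.2 == 2 then
        (PySem.List.pySetD st.1 i (PySem.List.pyGetD st.1 i 0 * st.2), 1)
      else
        (st.1, 2))
    (pnr, 2)).1

-- ===== PORT B =====
def multi_weight_alt (pnr : List Int) : List Int :=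
  (PySem.List.pyRange 0 pnr.length 2).foldl
    (fun l i => PySem.List.pySetD l i (PySem.List.pyGetD l i 0 * 2)) pnr

-- ===== PRECONDITION & SPEC =====
def Spec_multi_weight (pnr : List Int) (out : List Int) : Prop := out = multi_weight_alt pnr
instance (pnr : List Int) (out : List Int) : Decidable (Spec_multi_weight pnr out) := by unfold Spec_multi_weight; infer_instance

-- ===== CLAIM (what is proved, stated in full; the proofs are below) =====
def Claim_equal_multi_weight : Prop := ∀ (pnr : List Int), Dom_multi_weight pnr → Spec_multi_weight pnr (multi_weight pnr)

-- ===== LEMMAS AND PROOFS =====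

-- Nat-indexed versions of the two loop bodies.
def stepA (st : List Int × Int) (k : Nat) : List Int × Int :=
  if st.2 == 2 then (st.1.set k (st.1.getD k 0 * st.2), 1) else (st.1, 2)

def stepB (l : List Int) (k : Nat) : List Int :=
  l.set (2 * k) (l.getD (2 * k) 0 * 2)

lemma multi_weight_eq_nat (pnr : List Int) :
    multi_weight pnr = ((List.range pnr.length).foldl stepA (pnr, 2)).1 := by
  unfold multi_weight
  rw [PySem.List.pyRange_one]
  rw [List.foldl_map]
  simp only [PySem.List.pySetD_natCast, PySem.List.pyGetD_natCast, Int.zero_add, Int.sub_zero,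
    Int.toNat_natCast]
  rfl

lemma count_eq (n : Nat) :
    (if (0:Int) < (n:Int) then (((n:Int) - 0 + 2 - 1) / 2).toNat else 0) = (n + 1) / 2 := by
  split <;> omega

lemma multi_weight_alt_eq_nat (pnr : List Int) :
    multi_weight_alt pnr = (List.range ((pnr.length + 1) / 2)).foldl stepB pnr := by
  unfold multi_weight_alt
  rw [PySem.List.pyRange_of_pos 0 (pnr.length : Int) (by norm_num), count_eq]
  have hfun : (fun k : Nat => (0 : Int) + 2 * (k : Nat)) = (fun k : Nat => ((2 * k : Nat) : Int)) := by
    funext k; push_cast; ring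
  rw [hfun, List.foldl_map]
  simp only [PySem.List.pySetD_natCast, PySem.List.pyGetD_natCast]
  rfl

lemma range_peel2 (n : Nat) :
    List.range (n + 2) = 0 :: 1 :: (List.range n).map (· + 2) := by
  simp [List.range_succ_eq_map, List.map_map, Function.comp, Nat.succ_eq_add_one]

lemma shiftA (r : List Nat) (x y : Int) (l : List Int) (m : Int) :
    r.foldl (fun st k => stepA st (k + 2)) (x :: y :: l, m)
      = ((x :: y :: (r.foldl stepA (l, m)).1, (r.foldl stepA (l, m)).2)) := by
  induction r generalizing l m x y with
  | nil => simp
  | cons k r ih =>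
    simp only [List.foldl_cons]
    have hstep : stepA (x :: y :: l, m) (k + 2)
        = (x :: y :: (stepA (l, m) k).1, (stepA (l, m) k).2) := by
      rw [show k + 2 = (k + 1) + 1 from rfl]
      by_cases hm : m = 2
      · simp [stepA, hm, List.set_cons_succ]
      · simp [stepA, hm]
    rw [hstep, ih]

lemma shiftB (r : List Nat) (x y : Int) (l : List Int) :
    r.foldl (fun l k => stepB l (k + 1)) (x :: y :: l)
      = x :: y :: r.foldl stepB l := by
  induction r generalizing l x y with
  | nil => rfl
  | cons k r ih =>
    simp only [List.foldl_cons]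
    have h : stepB (x :: y :: l) (k + 1) = x :: y :: stepB l k := by
      simp only [stepB]
      rw [show 2 * (k + 1) = (2 * k + 1) + 1 from by omega]
      simp only [List.set_cons_succ, List.getD_cons_succ]
    rw [h, ih]

lemma key (n : Nat) : ∀ (t : List Int), t.length ≤ n →
    ((List.range t.length).foldl stepA (t, 2)).1
      = (List.range ((t.length + 1) / 2)).foldl stepB t := by
  induction n using Nat.strong_induction_on with
  | _ n ih =>
    intro t ht
    match t with
    | [] => rfl
    | [a] => simp [stepA, stepB]
    | a :: b :: t =>
      have hlen : (a :: b :: t).length = t.length + 2 := by simp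
      rw [hlen, range_peel2]
      simp only [List.foldl_cons, List.foldl_map]
      have h0 : stepA (a :: b :: t, 2) 0 = (a * 2 :: b :: t, 1) := by
        simp [stepA]
      have h1 : stepA (a * 2 :: b :: t, 1) 1 = (a * 2 :: b :: t, 2) := by
        simp [stepA]
      rw [h0, h1, shiftA]
      have hc : (t.length + 2 + 1) / 2 = (t.length + 1) / 2 + 1 := by omega
      rw [hc, List.range_succ_eq_map]
      simp only [List.foldl_cons, List.foldl_map]
      have hB0 : stepB (a :: b :: t) 0 = a * 2 :: b :: t := by
        simp [stepB]
      rw [hB0, shiftB]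
      have := ih (n-1) (by omega) t (by omega)
      simp only [this]

-- ===== VERDICT (by name: the statement is the Claim_ definition above) =====
theorem multi_weight_spec : Claim_equal_multi_weight := by
  intro pnr _
  unfold Spec_multi_weight
  rw [multi_weight_eq_nat, multi_weight_alt_eq_nat]
  exact key pnr.length pnr le_rfl
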